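-- pv_equiv track=rewrite | github.com/BugTraceAI/BugTraceAI-CLI | bugtrace/agents/mixins/tech_context.py | _detect_cloud_provider
-- ===== SOURCE A (Python) =====
-- from typing import Dict, List, Optional
--
-- def _detect_cloud_provider(infrastructure: List) -> List[str]:
--     """Detect cloud providers from infrastructure tags."""
--     detected = []
--     infra_str = " ".join(str(i).lower() for i in infrastructure)
--
--     if any(x in infra_str for x in ["aws", "amazon", "ec2", "s3", "alb", "elb", "cloudfront"]):
--         detected.append("aws")
--     if any(x in infra_str for x in ["gcp", "google", "gke", "cloud run", "gce", "app engine"]):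
--         detected.append("gcp")
--     if any(x in infra_str for x in ["azure", "microsoft", "aks", "app service"]):
--         detected.append("azure")
--
--     return detected
-- ===== SOURCE B (Python) =====
-- def _detect_cloud_provider(infrastructure):
--     """Detect cloud providers by one positional scan matching all keywords at once."""
--     infra_str = " ".join(str(i).lower() for i in infrastructure)
--     keyword_provider = [
--         ("aws", "aws"), ("amazon", "aws"), ("ec2", "aws"), ("s3", "aws"),
--         ("alb", "aws"), ("elb", "aws"), ("cloudfront", "aws"),
--         ("gcp", "gcp"), ("google", "gcp"), ("gke", "gcp"),
--         ("cloud run", "gcp"), ("gce", "gcp"), ("app engine", "gcp"),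
--         ("azure", "azure"), ("microsoft", "azure"), ("aks", "azure"),
--         ("app service", "azure"),
--     ]
--     matched = set()
--     for i in range(len(infra_str)):
--         for kw, provider in keyword_provider:
--             if infra_str.startswith(kw, i):
--                 matched.add(provider)
--     return [p for p in ("aws", "gcp", "azure") if p in matched]
-- ===== Notes on version B (the rewrite author's own statement) =====
-- stated objective: alternative
-- what changed: Replaces the three per-provider any(substring)-tests with a naive multi-pattern matcher: one scan over the positions of the joined string collecting matched providers into a set via startswith(kw, i), then emitting providers in the fixed aws/gcp/azure order.
import Mathlib
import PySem

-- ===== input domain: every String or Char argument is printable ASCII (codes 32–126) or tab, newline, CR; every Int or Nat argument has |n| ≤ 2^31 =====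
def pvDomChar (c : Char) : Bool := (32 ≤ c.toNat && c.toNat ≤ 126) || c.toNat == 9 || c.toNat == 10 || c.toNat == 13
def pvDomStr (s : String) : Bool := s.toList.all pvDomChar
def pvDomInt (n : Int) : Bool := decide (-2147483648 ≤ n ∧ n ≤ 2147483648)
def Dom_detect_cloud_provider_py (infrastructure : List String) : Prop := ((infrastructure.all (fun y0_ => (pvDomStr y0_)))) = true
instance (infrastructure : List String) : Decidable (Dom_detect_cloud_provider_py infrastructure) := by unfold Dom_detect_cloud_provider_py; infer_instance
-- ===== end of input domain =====

-- B replaces A's three per-provider any(substring) tests with a single positional scan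
-- of the joined string that collects matched providers into a set (objective: alternative).
set_option maxHeartbeats 1000000


-- ===== PORT A =====
def detect_cloud_provider_py (infrastructure : List String) : List String :=
  let infra_str := PySem.Str.join " " (infrastructure.map (fun i => PySem.Str.lower i))
  let detected : List String := []
  let detected :=
    if ["aws", "amazon", "ec2", "s3", "alb", "elb", "cloudfront"].any
        (fun x => PySem.Str.isIn x infra_str) then detected ++ ["aws"] else detected
  let detected :=
    if ["gcp", "google", "gke", "cloud run", "gce", "app engine"].any
        (fun x => PySem.Str.isIn x infra_str) then detected ++ ["gcp"] else detected
  let detected :=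
    if ["azure", "microsoft", "aks", "app service"].any
        (fun x => PySem.Str.isIn x infra_str) then detected ++ ["azure"] else detected
  detected

-- ===== PORT B =====
-- the (keyword, provider) pairs of Source B, in Source B's order
def pvKeywordProvider : List (String × String) :=
  [("aws", "aws"), ("amazon", "aws"), ("ec2", "aws"), ("s3", "aws"),
   ("alb", "aws"), ("elb", "aws"), ("cloudfront", "aws"),
   ("gcp", "gcp"), ("google", "gcp"), ("gke", "gcp"),
   ("cloud run", "gcp"), ("gce", "gcp"), ("app engine", "gcp"),
   ("azure", "azure"), ("microsoft", "azure"), ("aks", "azure"),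
   ("app service", "azure")]

-- infra_str.startswith(kw, i) for 0 ≤ i is exactly 'kw is a prefix of the i-th drop'
def detect_cloud_provider_py_alt (infrastructure : List String) : List String :=
  let infra_str := PySem.Str.join " " (infrastructure.map (fun i => PySem.Str.lower i))
  let s := infra_str.toList
  let matched : PySem.Set String :=
    (List.range s.length).foldl
      (fun m i =>
        pvKeywordProvider.foldl
          (fun m kp =>
            if PySem.Chars.startswith (s.drop i) kp.1.toList then PySem.Set.add m kp.2 else m)
          m)
      PySem.Set.empty
  ["aws", "gcp", "azure"].filter (fun p => PySem.Set.contains matched p)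

-- ===== PRECONDITION & SPEC =====
def Spec_detect_cloud_provider_py (infrastructure : List String) (out : List String) : Prop := out = detect_cloud_provider_py_alt infrastructure
instance (infrastructure : List String) (out : List String) : Decidable (Spec_detect_cloud_provider_py infrastructure out) := by unfold Spec_detect_cloud_provider_py; infer_instance

-- ===== CLAIM (what is proved, stated in full; the proofs are below) =====
def Claim_equal_detect_cloud_provider_py : Prop := ∀ (infrastructure : List String), Dom_detect_cloud_provider_py infrastructure → Spec_detect_cloud_provider_py infrastructure (detect_cloud_provider_py infrastructure)

-- ===== LEMMAS AND PROOFS =====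

-- membership after the inner fold over the keyword table at one position
theorem pv_mem_inner (s : List Char) (i : Nat) (tbl : List (String × String))
    (m : PySem.Set String) (p : String) :
    p ∈ tbl.foldl
        (fun m kp =>
          if PySem.Chars.startswith (s.drop i) kp.1.toList then PySem.Set.add m kp.2 else m) m
      ↔ p ∈ m ∨ ∃ kp ∈ tbl, kp.2 = p ∧ kp.1.toList <+: s.drop i := by
  induction tbl generalizing m with
  | nil => simp
  | cons kp tl ih =>
    simp only [List.foldl_cons, ih]
    by_cases h : PySem.Chars.startswith (s.drop i) kp.1.toList = true
    · have hpre : kp.1.toList <+: s.drop i := (PySem.Chars.startswith_iff _ _).mp h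
      simp [h, PySem.Set.mem_add, hpre]
      try tauto
    · have hnpre : ¬ kp.1.toList <+: s.drop i := fun hc =>
        h ((PySem.Chars.startswith_iff _ _).mpr hc)
      simp [h, hnpre]
      try tauto

-- membership after the outer fold over a list of positions
theorem pv_mem_scan (s : List Char) (L : List Nat) (m : PySem.Set String) (p : String) :
    p ∈ L.foldl
        (fun m i =>
          pvKeywordProvider.foldl
            (fun m kp =>
              if PySem.Chars.startswith (s.drop i) kp.1.toList then PySem.Set.add m kp.2 else m)
            m) m
      ↔ p ∈ m ∨ ∃ i ∈ L, ∃ kp ∈ pvKeywordProvider, kp.2 = p ∧ kp.1.toList <+: s.drop i := by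
  induction L generalizing m with
  | nil => simp
  | cons j tl ih =>
    simp only [List.foldl_cons, ih, pv_mem_inner]
    constructor
    · rintro (((hm | h) | h))
      · exact Or.inl hm
      · exact Or.inr ⟨j, by simp, h⟩
      · rcases h with ⟨i, hi, h⟩; exact Or.inr ⟨i, by simp [hi], h⟩
    · rintro (hm | ⟨i, hi, h⟩)
      · exact Or.inl (Or.inl hm)
      · rcases List.mem_cons.mp hi with rfl | hi
        · exact Or.inl (Or.inr h)
        · exact Or.inr ⟨i, hi, h⟩

-- a nonempty pattern occurs as a prefix of some bounded drop iff it is an infix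
theorem pv_exists_drop_iff (s kw : List Char) (hkw : kw ≠ []) :
    (∃ i ∈ List.range s.length, kw <+: s.drop i) ↔ kw <:+: s := by
  constructor
  · rintro ⟨i, _, h⟩
    exact h.isInfix.trans (List.drop_suffix i s).isInfix
  · intro h
    have : PySem.Chars.isIn kw s = true := (PySem.Chars.isIn_iff_infix _ _).mpr h
    obtain ⟨j, hj⟩ := (PySem.Chars.exists_prefix_drop_iff_isIn _ _).mpr this
    by_cases hlt : j < s.length
    · exact ⟨j, List.mem_range.mpr hlt, hj⟩
    · exfalso
      have : s.drop j = [] := List.drop_eq_nil_of_le (by omega)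
      rw [this] at hj
      exact hkw (List.eq_nil_of_prefix_nil hj)

-- the scanned set contains p iff some keyword of provider p occurs in s
theorem pv_mem_matched (s : List Char) (p : String) :
    p ∈ (List.range s.length).foldl
        (fun m i =>
          pvKeywordProvider.foldl
            (fun m kp =>
              if PySem.Chars.startswith (s.drop i) kp.1.toList then PySem.Set.add m kp.2 else m)
            m) PySem.Set.empty
      ↔ ∃ kp ∈ pvKeywordProvider, kp.2 = p ∧ kp.1.toList <:+: s := by
  rw [pv_mem_scan]
  constructor
  · rintro (hm | ⟨i, hi, kp, hkp, hp, hpre⟩)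
    · simp [PySem.Set.empty] at hm
    · exact ⟨kp, hkp, hp, (pv_exists_drop_iff s kp.1.toList
        (by revert hkp; unfold pvKeywordProvider; intro hkp; fin_cases hkp <;> decide)).mp
        ⟨i, hi, hpre⟩⟩
  · rintro ⟨kp, hkp, hp, hinf⟩
    obtain ⟨i, hi, hpre⟩ := (pv_exists_drop_iff s kp.1.toList
      (by revert hkp; unfold pvKeywordProvider; intro hkp; fin_cases hkp <;> decide)).mpr hinf
    exact Or.inr ⟨i, hi, kp, hkp, hp, hpre⟩

-- ===== VERDICT (by name: the statement is the Claim_ definition above) =====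
theorem detect_cloud_provider_py_spec : Claim_equal_detect_cloud_provider_py := by
  intro infrastructure _
  unfold Spec_detect_cloud_provider_py
  simp only [detect_cloud_provider_py, detect_cloud_provider_py_alt]
  set t := PySem.Str.join " " (infrastructure.map fun i => PySem.Str.lower i) with ht
  set matched := (List.range t.toList.length).foldl
      (fun m i =>
        pvKeywordProvider.foldl
          (fun m kp =>
            if PySem.Chars.startswith (t.toList.drop i) kp.1.toList then PySem.Set.add m kp.2 else m)
          m) PySem.Set.empty with hm
  have e1 : PySem.Set.contains matched "aws"
      = (["aws", "amazon", "ec2", "s3", "alb", "elb", "cloudfront"].any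
          (fun x => PySem.Str.isIn x t)) := by
    rw [Bool.eq_iff_iff, PySem.Set.contains_iff, hm, pv_mem_matched]
    simp [pvKeywordProvider, PySem.Chars.isIn_iff_infix]
  have e2 : PySem.Set.contains matched "gcp"
      = (["gcp", "google", "gke", "cloud run", "gce", "app engine"].any
          (fun x => PySem.Str.isIn x t)) := by
    rw [Bool.eq_iff_iff, PySem.Set.contains_iff, hm, pv_mem_matched]
    simp [pvKeywordProvider, PySem.Chars.isIn_iff_infix]
  have e3 : PySem.Set.contains matched "azure"
      = (["azure", "microsoft", "aks", "app service"].any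
          (fun x => PySem.Str.isIn x t)) := by
    rw [Bool.eq_iff_iff, PySem.Set.contains_iff, hm, pv_mem_matched]
    simp [pvKeywordProvider, PySem.Chars.isIn_iff_infix]
  simp only [List.filter_cons, List.filter_nil, e1, e2, e3]
  split_ifs <;> rfl
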